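-- pv_equiv track=rewrite | github.com/JonahF127/Nonlinear | svm.py | flagged_words_count
-- ===== SOURCE A (Python) =====
-- import string
--
-- def flagged_words_count(email):
--     # remove punctuation from email
--     text = email.translate(str.maketrans('', '', string.punctuation))
--
--     # make text lowercase
--     lowercase_text = text.lower()
--
--     # Make the list of common words in spam
--     flagged_words = [
--         "free",
--         "new",
--         "now",
--         "immediately",
--         "urgent",
--         "final",
--         "premium",
--         "win",
--         "won",
--         "money",
--         "offer",
--         "prize",
--         "click",
--         "text",
--         "txt",
--         "call",
--         "subscription",
--         "subscribe",
--         "sex",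
--         ]
--
--     # Compare the email with flagged_words
--     words = lowercase_text.split()
--     flagged_word_count = sum(1 for word in words if word in flagged_words)
--     return flagged_word_count
-- ===== SOURCE B (Python) =====
-- import string
-- from collections import Counter
--
-- def flagged_words_count(email):
--     # identical preprocessing: strip punctuation, lowercase, split
--     text = email.translate(str.maketrans('', '', string.punctuation))
--     words = text.lower().split()
--     # one frequency table, then sum counts over the fixed flagged list
--     counts = Counter(words)
--     flagged_words = [
--         "free", "new", "now", "immediately", "urgent", "final", "premium",
--         "win", "won", "money", "offer", "prize", "click", "text", "txt",
--         "call", "subscription", "subscribe", "sex",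
--     ]
--     return sum(counts[w] for w in flagged_words)
-- ===== Notes on version B (the rewrite author's own statement) =====
-- stated objective: idiomatic
-- what changed: Inverts the traversal: instead of testing every email word against the flagged list, B builds a Counter of the words once and sums the counts of the 19 fixed flagged words.
import Mathlib
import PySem

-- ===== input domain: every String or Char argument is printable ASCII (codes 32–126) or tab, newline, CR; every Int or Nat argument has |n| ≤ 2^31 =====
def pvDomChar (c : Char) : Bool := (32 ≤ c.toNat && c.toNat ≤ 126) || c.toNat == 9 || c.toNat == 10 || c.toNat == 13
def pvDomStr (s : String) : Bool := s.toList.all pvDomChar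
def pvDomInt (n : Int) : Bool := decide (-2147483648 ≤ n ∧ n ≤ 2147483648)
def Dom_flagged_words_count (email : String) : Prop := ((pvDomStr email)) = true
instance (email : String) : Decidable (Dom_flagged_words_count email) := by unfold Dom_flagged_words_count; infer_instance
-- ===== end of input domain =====

-- B builds a word-frequency table once and sums the counts of the 19 fixed
-- flagged words (idiomatic Counter inversion); return value proved equal to A's.


-- string.punctuation (shared table; A and B preprocess identically)
def pvPunct : List Char := "!\"#$%&'()*+,-./:;<=>?@[\\]^_`{|}~".toList

-- email.translate(str.maketrans('', '', string.punctuation)): drop exactly those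
-- characters (exact on the ASCII domain, where string.punctuation is the full table)
def pvStripPunct (email : String) : String :=
  String.ofList (email.toList.filter (fun c => !pvPunct.contains c))

def pvFlagged : List String :=
  ["free", "new", "now", "immediately", "urgent", "final", "premium",
   "win", "won", "money", "offer", "prize", "click", "text", "txt",
   "call", "subscription", "subscribe", "sex"]

-- ===== PORT A =====
def flagged_words_count (email : String) : Int :=
  let text := pvStripPunct email
  let lowercase_text := PySem.Str.lower text
  let flagged_words := pvFlagged
  let words := PySem.Str.split₀ lowercase_text
  words.foldl (fun acc word => if flagged_words.contains word then acc + 1 else acc) 0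

-- ===== PORT B =====
def flagged_words_count_alt (email : String) : Int :=
  let text := pvStripPunct email
  let words := PySem.Str.split₀ (PySem.Str.lower text)
  let counts := PySem.Dict.counter words
  let flagged_words := pvFlagged
  flagged_words.foldl (fun acc w => acc + counts.getD w 0) 0

-- ===== PRECONDITION & SPEC =====
def Spec_flagged_words_count (email : String) (out : Int) : Prop := out = flagged_words_count_alt email
instance (email : String) (out : Int) : Decidable (Spec_flagged_words_count email out) := by unfold Spec_flagged_words_count; infer_instance

-- ===== CLAIM (what is proved, stated in full; the proofs are below) =====
def Claim_equal_flagged_words_count : Prop := ∀ (email : String), Dom_flagged_words_count email → Spec_flagged_words_count email (flagged_words_count email)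

-- ===== LEMMAS AND PROOFS =====

-- summing per-flagged-word counts equals counting flagged occurrences, given a
-- duplicate-free flagged list
theorem pv_sum_counts (fs ws : List String) (h : fs.Nodup) :
    (fs.map (fun f => (ws.count f : Int))).sum = (ws.countP (fun w => fs.contains w) : Int) := by
  induction ws with
  | nil => simp
  | cons w ws ih =>
    have hc : (fs.map (fun f => (((w :: ws).count f : Nat) : Int))).sum
        = (fs.map (fun f => (((ws.count f : Nat) : Int)) + (if f == w then 1 else 0))).sum := by
      apply congrArg
      apply List.map_congr_left
      intro f _
      rcases eq_or_ne f w with hfw | hfw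
      · subst hfw; simp [List.count_cons]
      · simp [List.count_cons, hfw, Ne.symm hfw]
    rw [hc, PySem.List.sum_map_add_int, ih, PySem.List.sum_map_ite_one_zero]
    have hfs : fs.countP (fun f => f == w) = fs.count w := by
      simp [List.count]
    by_cases hw : w ∈ fs
    · have h1 : fs.count w = 1 := List.count_eq_one_of_mem h hw
      simp [List.countP_cons, hfs, h1, hw]
    · have h0 : fs.count w = 0 := List.count_eq_zero_of_not_mem hw
      simp [List.countP_cons, hfs, h0, hw]

theorem flagged_words_count_eq_alt (email : String) :
    flagged_words_count email = flagged_words_count_alt email := by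
  simp only [flagged_words_count, flagged_words_count_alt]
  rw [PySem.List.foldl_if_add_one, PySem.List.foldl_add]
  rw [← pv_sum_counts pvFlagged (PySem.Str.split₀ (PySem.Str.lower (pvStripPunct email))) (by decide)]
  refine congrArg (0 + ·) (congrArg List.sum (List.map_congr_left ?_))
  intro w _
  rw [PySem.Dict.getD_counter]

-- ===== VERDICT (by name: the statement is the Claim_ definition above) =====
theorem flagged_words_count_spec : Claim_equal_flagged_words_count := by
  intro email _
  exact flagged_words_count_eq_alt email
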